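-- pv_equiv track=rewrite | github.com/dennisjmoritz/pokeemerald-expansion | tools/cleanup_undefined_refs.py | comment_out_symbol_occurrences
-- ===== SOURCE A (Python) =====
-- COMMENT_PREFIX = "// FIXME undefined reference: "
--
-- def comment_out_symbol_occurrences(content: str, symbols: set[str]) -> tuple[str, bool]:
--     """Comment out lines containing any of the undefined symbols."""
--     lines = content.splitlines(keepends=True)
--     modified = False
--
--     for idx, line in enumerate(lines):
--         stripped = line.lstrip()
--         if not stripped or stripped.startswith("//") or stripped.startswith("/*"):
--             continue
--         if any(symbol in line for symbol in symbols):
--             lines[idx] = COMMENT_PREFIX + line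
--             modified = True
--
--     return ("".join(lines), modified)
-- ===== SOURCE B (Python) =====
-- COMMENT_PREFIX = "// FIXME undefined reference: "
--
--
-- def comment_out_symbol_occurrences(content: str, symbols: set[str]) -> tuple[str, bool]:
--     """Comment out lines containing any of the undefined symbols."""
--     lines = content.splitlines(keepends=True)
--     # line_of[p] = index of the line holding content position p
--     line_of = []
--     for idx, ln in enumerate(lines):
--         line_of += [idx] * len(ln)
--     # one global scan of the whole text per symbol: collect the lines that
--     # contain an occurrence lying wholly inside a single line
--     flagged = set()
--     for sym in symbols:
--         if not sym:
--             flagged.update(range(len(lines)))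
--             continue
--         i = content.find(sym)
--         while i != -1:
--             if line_of[i] == line_of[i + len(sym) - 1]:
--                 flagged.add(line_of[i])
--             i = content.find(sym, i + 1)
--     pieces = []
--     modified = False
--     for idx, line in enumerate(lines):
--         stripped = line.lstrip()
--         if idx in flagged and stripped and not stripped.startswith(("//", "/*")):
--             pieces.append(COMMENT_PREFIX)
--             modified = True
--         pieces.append(line)
--     return ("".join(pieces), modified)
-- ===== Notes on version B (the rewrite author's own statement) =====
-- stated objective: alternative
-- what changed: B replaces A's per-line loop over all symbols (one 'symbol in line' substring scan per symbol per line) with one global find-scan of the whole text per symbol, mapping each hit back to its line through a precomputed position-to-line table and keeping only hits that lie wholly inside one line; the flagged line set is then applied in a single output pass.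
import Mathlib
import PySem

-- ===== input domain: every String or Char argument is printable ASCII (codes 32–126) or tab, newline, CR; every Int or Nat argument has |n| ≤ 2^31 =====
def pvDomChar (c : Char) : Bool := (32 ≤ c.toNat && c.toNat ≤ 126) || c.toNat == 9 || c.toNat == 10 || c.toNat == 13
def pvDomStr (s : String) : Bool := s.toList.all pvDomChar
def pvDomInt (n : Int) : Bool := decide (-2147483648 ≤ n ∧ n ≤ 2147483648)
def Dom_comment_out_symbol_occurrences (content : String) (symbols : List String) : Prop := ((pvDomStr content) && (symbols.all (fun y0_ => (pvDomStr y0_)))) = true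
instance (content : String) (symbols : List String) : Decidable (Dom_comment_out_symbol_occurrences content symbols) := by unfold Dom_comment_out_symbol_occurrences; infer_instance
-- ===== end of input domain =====

-- B flags lines by ONE global find-scan of the whole text per symbol (mapping each hit back to
-- its line through a position→line table) instead of A's per-line substring test of every symbol;
-- objective: alternative (a different algorithm of similar cost).

-- shared helper: content.splitlines(keepends=True), exact on the Dom alphabet
-- (the only line boundaries in Dom are '\n', '\r' and '\r\n'; hand-ported because
-- PySem.Chars.splitlines drops the ends).
def pvSplitKeep : List Char → List Char → List (List Char)
  | [], acc => if acc.isEmpty then [] else [acc.reverse]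
  | '\r' :: '\n' :: rest, acc => (acc.reverse ++ ['\r', '\n']) :: pvSplitKeep rest []
  | c :: rest, acc =>
    if c = '\n' ∨ c = '\r' then (acc.reverse ++ [c]) :: pvSplitKeep rest []
    else pvSplitKeep rest (c :: acc)

def pvCommentPrefix : List Char := "// FIXME undefined reference: ".toList

-- ===== PORT A =====
-- literal transliteration of A: lstrip each line, skip blank/comment lines,
-- else if any symbol is a substring of the line, replace the line by prefix ++ line.
def comment_out_symbol_occurrences (content : String) (symbols : List String) : String × Bool :=
  let lines := pvSplitKeep content.toList []
  let res := lines.foldl (fun (st : List (List Char) × Bool) line =>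
      let stripped := PySem.Chars.lstrip line
      if stripped.isEmpty || PySem.Chars.startswith stripped ['/', '/'] || PySem.Chars.startswith stripped ['/', '*'] then
        (st.1 ++ [line], st.2)
      else if symbols.any (fun s => PySem.Chars.isIn s.toList line) then
        (st.1 ++ [pvCommentPrefix ++ line], true)
      else
        (st.1 ++ [line], st.2)) ([], false)
  (String.ofList (PySem.Chars.join [] res.1), res.2)

-- ===== PORT B =====
-- Source B's position→line table: line_of += [idx] * len(ln) for each enumerated line
def pvLineOf (lines : List (List Char)) : List Int :=
  (PySem.List.enumerate lines).foldl (fun acc p => acc ++ List.replicate p.2.length p.1) []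

-- Source B's per-symbol find loop: i = content.find(sym); while i != -1: …; i = content.find(sym, i+1).
-- The 'cs.length < start' disjunct only makes the recursion total: Python's find returns -1 there too.
def pvSymLoop (cs : List Char) (lineOf : List Int) (sym : List Char)
    (flagged : PySem.Set Int) (start : Nat) : PySem.Set Int :=
  let r := PySem.Chars.findFrom cs sym (start : Int) none
  if h : r = -1 ∨ cs.length < start then flagged
  else
    let fl' := if PySem.List.pyGetD lineOf r 0 = PySem.List.pyGetD lineOf (r + sym.length - 1) 0 then
        PySem.Set.add flagged (PySem.List.pyGetD lineOf r 0)
      else flagged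
    pvSymLoop cs lineOf sym fl' (r.toNat + 1)
termination_by cs.length + 1 - start
decreasing_by
  rw [not_or, not_lt] at h
  obtain ⟨hne, hle⟩ := h
  have hspec := PySem.Chars.findFrom_natCast_spec cs sym start hle hne
  have hr := PySem.Chars.findFrom_natCast cs sym start hle
  rw [hr] at hspec ⊢
  split at hspec
  · exact absurd (hr.trans (by simp_all)) hne
  · have hlen := PySem.Chars.find_le_length (cs.drop start) sym
    simp only [List.length_drop] at hlen
    have _hfind := PySem.Chars.neg_one_le_find (cs.drop start) sym
    omega

def comment_out_symbol_occurrences_alt (content : String) (symbols : List String) : String × Bool :=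
  let lines := pvSplitKeep content.toList []
  let lineOf := pvLineOf lines
  let flagged := symbols.foldl (fun fl s =>
      if s.toList.isEmpty then
        PySem.Set.update fl (PySem.List.pyRange 0 lines.length 1)
      else
        pvSymLoop content.toList lineOf s.toList fl 0) PySem.Set.empty
  let res := (PySem.List.enumerate lines).foldl (fun (st : List (List Char) × Bool) p =>
      let stripped := PySem.Chars.lstrip p.2
      if PySem.Set.contains flagged p.1 && !stripped.isEmpty
          && !(PySem.Chars.startswith stripped ['/', '/'] || PySem.Chars.startswith stripped ['/', '*']) then
        (st.1 ++ [pvCommentPrefix, p.2], true)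
      else
        (st.1 ++ [p.2], st.2)) ([], false)
  (String.ofList (PySem.Chars.join [] res.1), res.2)

-- ===== PRECONDITION & SPEC =====
def Spec_comment_out_symbol_occurrences (content : String) (symbols : List String) (out : String × Bool) : Prop := out = comment_out_symbol_occurrences_alt content symbols
instance (content : String) (symbols : List String) (out : String × Bool) : Decidable (Spec_comment_out_symbol_occurrences content symbols out) := by unfold Spec_comment_out_symbol_occurrences; infer_instance

-- ===== CLAIM (what is proved, stated in full; the proofs are below) =====
def Claim_equal_comment_out_symbol_occurrences : Prop := ∀ (content : String) (symbols : List String), Dom_comment_out_symbol_occurrences content symbols → Spec_comment_out_symbol_occurrences content symbols (comment_out_symbol_occurrences content symbols)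

-- ===== LEMMAS AND PROOFS =====

-- "some occurrence of s at a position >= start lies wholly inside the line numbered j"
def pvOcc (cs : List Char) (lineOf : List Int) (s : List Char) (start : Nat) (j : Int) : Prop :=
  ∃ i : Nat, start ≤ i ∧ s <+: cs.drop i ∧
    lineOf.getD i 0 = lineOf.getD (i + s.length - 1) 0 ∧ lineOf.getD i 0 = j

-- the position→line table as a flatMap, with an arbitrary first line number
def pvG (lines : List (List Char)) (s0 : Int) : List Int :=
  (PySem.List.enumerate lines s0).flatMap (fun p => List.replicate p.2.length p.1)

theorem pvG_cons (ln : List Char) (rest : List (List Char)) (s0 : Int) :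
    pvG (ln :: rest) s0 = List.replicate ln.length s0 ++ pvG rest (s0 + 1) := by
  simp [pvG, PySem.List.enumerate_cons]

theorem pvG_length (lines : List (List Char)) (s0 : Int) :
    (pvG lines s0).length = lines.flatten.length := by
  induction lines generalizing s0 with
  | nil => simp [pvG]
  | cons ln rest ih => simp [pvG_cons, ih]

theorem pvG_lower (lines : List (List Char)) (s0 : Int) :
    ∀ x ∈ pvG lines s0, s0 ≤ x := by
  induction lines generalizing s0 with
  | nil => simp [pvG]
  | cons ln rest ih =>
    intro x hx
    rw [pvG_cons, List.mem_append] at hx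
    rcases hx with hx | hx
    · simp [List.eq_of_mem_replicate hx]
    · linarith [ih (s0 + 1) x hx]

theorem pvG_getD_lt (ln : List Char) (rest : List (List Char)) (s0 : Int) (idx : Nat)
    (h : idx < ln.length) : (pvG (ln :: rest) s0).getD idx 0 = s0 := by
  rw [pvG_cons, List.getD_eq_getElem?_getD, List.getElem?_append_left (by simpa using h),
    List.getElem?_replicate]
  simp [h]

theorem pvG_getD_ge (ln : List Char) (rest : List (List Char)) (s0 : Int) (idx : Nat)
    (h : ln.length ≤ idx) :
    (pvG (ln :: rest) s0).getD idx 0 = (pvG rest (s0 + 1)).getD (idx - ln.length) 0 := by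
  rw [pvG_cons, List.getD_eq_getElem?_getD, List.getElem?_append_right (by simpa using h),
    ← List.getD_eq_getElem?_getD]
  simp

theorem pvLineOf_eq (lines : List (List Char)) : pvLineOf lines = pvG lines 0 := by
  simp [pvLineOf, pvG, List.flatMap_def]

theorem pvSplitKeep_flatten (cs acc : List Char) :
    (pvSplitKeep cs acc).flatten = acc.reverse ++ cs := by
  fun_induction pvSplitKeep cs acc <;>
    first
    | (split <;> simp_all [List.isEmpty_iff])
    | simp_all [List.isEmpty_iff]

theorem pvOcc_bounds {s : List Char} (hs : s ≠ []) {cs : List Char} {i : Nat}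
    (h : s <+: cs.drop i) : i + s.length ≤ cs.length ∧ 0 < s.length := by
  have h1 := h.length_le
  have h2 : 0 < s.length := List.length_pos_of_ne_nil hs
  simp only [List.length_drop] at h1
  omega

theorem pvPrefix_append_left {α : Type} {s x y : List α} (h : s <+: x ++ y)
    (hl : s.length ≤ x.length) : s <+: x := by
  have h1 := List.prefix_iff_eq_take.mp h
  rw [List.take_append, (by omega : s.length - x.length = 0), List.take_zero,
    List.append_nil] at h1
  rw [h1]
  exact List.take_prefix _ _

-- the heart: a wholly-inside-one-line occurrence of a nonempty s in the concatenation
-- is exactly an occurrence of s inside one of the lines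
theorem pvOcc_iff (lines : List (List Char)) (s : List Char) (hs : s ≠ []) (s0 : Int) (j : Int) :
    pvOcc lines.flatten (pvG lines s0) s 0 j ↔
      ∃ (k : Nat) (_ : k < lines.length), j = s0 + k ∧ PySem.Chars.isIn s lines[k] = true := by
  induction lines generalizing s0 j with
  | nil =>
    constructor
    · rintro ⟨i, -, hpre, -, -⟩
      obtain ⟨h1, h2⟩ := pvOcc_bounds hs hpre
      simp only [List.flatten_nil, List.length_nil] at h1
      omega
    · rintro ⟨k, hk, -⟩; exact absurd hk (by simp)
  | cons ln rest ih =>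
    have hslen : 0 < s.length := List.length_pos_of_ne_nil hs
    have hfl : (ln :: rest).flatten = ln ++ rest.flatten := by simp
    constructor
    · rintro ⟨i, -, hpre, heq, hval⟩
      have hb := (pvOcc_bounds hs hpre).1
      rw [hfl] at hb
      simp only [List.length_append] at hb
      by_cases h1 : i + s.length ≤ ln.length
      · refine ⟨0, by simp, ?_, ?_⟩
        · rw [← hval, pvG_getD_lt ln rest s0 i (by omega)]; simp
        · simp only [List.getElem_cons_zero]
          rw [← PySem.Chars.exists_prefix_drop_iff_isIn]
          refine ⟨i, ?_⟩
          rw [hfl, List.drop_append, (by omega : i - ln.length = 0), List.drop_zero] at hpre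
          exact pvPrefix_append_left hpre (by simp only [List.length_drop]; omega)
      · by_cases h2 : i < ln.length
        · exfalso
          have e1 : (pvG (ln :: rest) s0).getD i 0 = s0 := pvG_getD_lt _ _ _ _ h2
          have e2 := pvG_getD_ge ln rest s0 (i + s.length - 1) (by omega)
          have hlt : i + s.length - 1 - ln.length < (pvG rest (s0 + 1)).length := by
            rw [pvG_length]; omega
          have hmem : (pvG rest (s0 + 1)).getD (i + s.length - 1 - ln.length) 0 ∈ pvG rest (s0 + 1) := by
            rw [List.getD_eq_getElem _ _ hlt]; exact List.getElem_mem _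
          have hlow := pvG_lower rest (s0 + 1) _ hmem
          rw [e1, e2] at heq
          omega
        · -- whole occurrence inside the tail: shift by ln.length
          have hge : ln.length ≤ i := by omega
          have hd : ((ln :: rest).flatten).drop i = rest.flatten.drop (i - ln.length) := by
            rw [hfl, List.drop_append, List.drop_eq_nil_of_le hge, List.nil_append]
          have hocc : pvOcc rest.flatten (pvG rest (s0 + 1)) s 0 j := by
            refine ⟨i - ln.length, Nat.zero_le _, by rw [← hd]; exact hpre, ?_, ?_⟩
            · rw [← pvG_getD_ge ln rest s0 i hge,
                (by omega : i - ln.length + s.length - 1 = (i + s.length - 1) - ln.length),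
                ← pvG_getD_ge ln rest s0 (i + s.length - 1) (by omega)]
              exact heq
            · rw [← pvG_getD_ge ln rest s0 i hge]; exact hval
          obtain ⟨k, hk, hj, hin⟩ := (ih (s0 + 1) j).mp hocc
          refine ⟨k + 1, by simp only [List.length_cons]; omega, ?_, by simpa using hin⟩
          rw [hj]; push_cast; ring
    · rintro ⟨k, hk, hj, hin⟩
      cases k with
      | zero =>
        simp only [List.getElem_cons_zero] at hin
        rw [← PySem.Chars.exists_prefix_drop_iff_isIn] at hin
        obtain ⟨i, hpre⟩ := hin
        have hb := (pvOcc_bounds hs hpre).1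
        refine ⟨i, Nat.zero_le _, ?_, ?_, ?_⟩
        · rw [hfl, List.drop_append, (by omega : i - ln.length = 0), List.drop_zero]
          exact hpre.trans (List.prefix_append _ _)
        · rw [pvG_getD_lt _ _ _ _ (by omega), pvG_getD_lt _ _ _ _ (by omega)]
        · rw [pvG_getD_lt _ _ _ _ (by omega)]
          simpa using hj.symm
      | succ k =>
        have hk' : k < rest.length := by simp only [List.length_cons] at hk; omega
        have hin' : PySem.Chars.isIn s rest[k] = true := by simpa using hin
        obtain ⟨i, -, hpre, heq, hval⟩ := (ih (s0 + 1) j).mpr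
          ⟨k, hk', by rw [hj]; push_cast; ring, hin'⟩
        have hb := (pvOcc_bounds hs hpre).1
        refine ⟨ln.length + i, Nat.zero_le _, ?_, ?_, ?_⟩
        · rw [hfl, List.drop_append, List.drop_eq_nil_of_le (by omega),
            List.nil_append, (by omega : ln.length + i - ln.length = i)]
          exact hpre
        · rw [pvG_getD_ge ln rest s0 (ln.length + i) (by omega),
            (by omega : ln.length + i - ln.length = i),
            pvG_getD_ge ln rest s0 (ln.length + i + s.length - 1) (by omega),
            (by omega : ln.length + i + s.length - 1 - ln.length = i + s.length - 1)]
          exact heq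
        · rw [pvG_getD_ge ln rest s0 (ln.length + i) (by omega),
            (by omega : ln.length + i - ln.length = i)]
          exact hval

theorem pvNoOcc_of_gt {cs s : List Char} (hs : s ≠ []) {start : Nat}
    (hgt : cs.length < start) (lineOf : List Int) (j : Int) :
    ¬ pvOcc cs lineOf s start j := by
  rintro ⟨i, hi, hpre, -, -⟩
  have := pvOcc_bounds hs hpre
  omega

theorem pvNoOcc_of_notInfix {cs s : List Char} {start : Nat}
    (hni : ¬ s <:+: cs.drop start) (lineOf : List Int) (j : Int) :
    ¬ pvOcc cs lineOf s start j := by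
  rintro ⟨i, hi, hpre, -, -⟩
  apply hni
  rw [← PySem.Chars.isIn_iff_infix, ← PySem.Chars.exists_prefix_drop_iff_isIn]
  refine ⟨i - start, ?_⟩
  rw [List.drop_drop, (by omega : start + (i - start) = i)]
  exact hpre

theorem pvOcc_split (cs : List Char) (lineOf : List Int) (s : List Char)
    (start rt : Nat) (j : Int) (hstart : start ≤ rt) (hprefix : s <+: cs.drop rt)
    (hmin : ∀ i, start ≤ i → i < rt → ¬ s <+: cs.drop i) :
    pvOcc cs lineOf s start j ↔
      (lineOf.getD rt 0 = lineOf.getD (rt + s.length - 1) 0 ∧ lineOf.getD rt 0 = j)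
      ∨ pvOcc cs lineOf s (rt + 1) j := by
  constructor
  · rintro ⟨i, hi, hpre, heq, hval⟩
    rcases lt_trichotomy i rt with h | h | h
    · exact absurd hpre (hmin i hi h)
    · subst h; exact Or.inl ⟨heq, hval⟩
    · exact Or.inr ⟨i, by omega, hpre, heq, hval⟩
  · rintro (⟨heq, hval⟩ | ⟨i, hi, hpre, heq, hval⟩)
    · exact ⟨rt, hstart, hprefix, heq, hval⟩
    · exact ⟨i, by omega, hpre, heq, hval⟩

-- the find loop collects exactly the lines with an occurrence at position >= start
theorem pvSymLoop_mem (cs : List Char) (lineOf : List Int) (s : List Char) (hs : s ≠ [])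
    (start : Nat) (flagged : PySem.Set Int) (j : Int) :
    j ∈ pvSymLoop cs lineOf s flagged start ↔ j ∈ flagged ∨ pvOcc cs lineOf s start j := by
  suffices H : ∀ n start flagged, cs.length + 1 - start ≤ n →
      (j ∈ pvSymLoop cs lineOf s flagged start ↔ j ∈ flagged ∨ pvOcc cs lineOf s start j) from
    H (cs.length + 1 - start) start flagged le_rfl
  intro n
  induction n with
  | zero =>
    intro start flagged hle
    have hgt : cs.length < start := by omega
    rw [pvSymLoop, dif_pos (Or.inr hgt)]
    simp [pvNoOcc_of_gt hs hgt lineOf j]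
  | succ n ihn =>
    intro start flagged hle
    rw [pvSymLoop]
    by_cases h : PySem.Chars.findFrom cs s (start : Int) none = -1 ∨ cs.length < start
    · rw [dif_pos h]
      rcases h with hr | hgt
      · by_cases hgt : cs.length < start
        · simp [pvNoOcc_of_gt hs hgt lineOf j]
        · have hle2 : start ≤ cs.length := by omega
          have hni := (PySem.Chars.findFrom_natCast_eq_neg_one_iff cs s start hle2).mp hr
          simp [pvNoOcc_of_notInfix hni lineOf j]
      · simp [pvNoOcc_of_gt hs hgt lineOf j]
    · rw [dif_neg h]
      rw [not_or, not_lt] at h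
      obtain ⟨hne, hle2⟩ := h
      set r := PySem.Chars.findFrom cs s (start : Int) none with hrdef
      obtain ⟨hr1, hr2, hr3⟩ := PySem.Chars.findFrom_natCast_spec cs s start hle2 hne
      rw [← hrdef] at hr1 hr2 hr3
      have hslen : 0 < s.length := List.length_pos_of_ne_nil hs
      have hr0 : (0 : Int) ≤ r := le_trans (by positivity) hr1
      have hrtge : start ≤ r.toNat := by omega
      have hb := (pvOcc_bounds hs hr2).1
      have hcast1 : PySem.List.pyGetD lineOf r 0 = lineOf.getD r.toNat 0 :=
        PySem.List.pyGetD_of_nonneg lineOf 0 hr0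
      have hcast2 : PySem.List.pyGetD lineOf (r + (s.length : Int) - 1) 0
          = lineOf.getD (r.toNat + s.length - 1) 0 := by
        rw [PySem.List.pyGetD_of_nonneg lineOf 0 (by omega)]
        congr 1
        omega
      rw [ihn (r.toNat + 1) _ (by omega),
        pvOcc_split cs lineOf s start r.toNat j hrtge hr2 hr3, hcast1, hcast2]
      by_cases hchk : lineOf.getD r.toNat 0 = lineOf.getD (r.toNat + s.length - 1) 0
      · rw [if_pos hchk, PySem.Set.mem_add]
        constructor
        · rintro ((h | h) | h)
          · exact Or.inl h
          · exact Or.inr (Or.inl ⟨hchk, h.symm⟩)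
          · exact Or.inr (Or.inr h)
        · rintro (h | (⟨-, h⟩ | h))
          · exact Or.inl (Or.inl h)
          · exact Or.inl (Or.inr h.symm)
          · exact Or.inr h
      · rw [if_neg hchk]
        constructor
        · rintro (h | h)
          · exact Or.inl h
          · exact Or.inr (Or.inr h)
        · rintro (h | (⟨hc, -⟩ | h))
          · exact Or.inl h
          · exact absurd hc hchk
          · exact Or.inr h

theorem pvMem_update (s : PySem.Set Int) (xs : List Int) (j : Int) :
    j ∈ PySem.Set.update s xs ↔ j ∈ s ∨ j ∈ xs := by
  induction xs generalizing s with
  | nil => simp [PySem.Set.update]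
  | cons x xs ih =>
    rw [show PySem.Set.update s (x :: xs) = PySem.Set.update (PySem.Set.add s x) xs from rfl, ih,
      PySem.Set.mem_add]
    simp only [List.mem_cons]
    tauto

theorem pvContains_eq (s : PySem.Set Int) (k : Int) :
    PySem.Set.contains s k = true ↔ k ∈ s := by
  rw [PySem.Set.contains]
  simp

-- membership in the symbols fold
theorem pvFlagged_mem (cs : List Char) (lineOf : List Int) (nLines : Nat)
    (symbols : List String) (fl : PySem.Set Int) (j : Int) :
    j ∈ symbols.foldl (fun fl s =>
        if s.toList.isEmpty then PySem.Set.update fl (PySem.List.pyRange 0 (nLines : Int) 1)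
        else pvSymLoop cs lineOf s.toList fl 0) fl ↔
      j ∈ fl ∨ ∃ s ∈ symbols,
        (if s.toList = [] then 0 ≤ j ∧ j < (nLines : Int) else pvOcc cs lineOf s.toList 0 j) := by
  induction symbols generalizing fl with
  | nil => simp
  | cons s rest ih =>
    rw [List.foldl_cons]
    by_cases hempty : s.toList = []
    · rw [if_pos (by simp [hempty]), ih, pvMem_update, PySem.List.mem_pyRange_one]
      constructor
      · rintro ((h | h) | ⟨t, ht, hc⟩)
        · exact Or.inl h
        · exact Or.inr ⟨s, by simp, by rw [if_pos hempty]; exact h⟩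
        · exact Or.inr ⟨t, by simp [ht], hc⟩
      · rintro (h | ⟨t, ht, hc⟩)
        · exact Or.inl (Or.inl h)
        · rcases List.mem_cons.mp ht with rfl | ht'
          · rw [if_pos hempty] at hc
            exact Or.inl (Or.inr hc)
          · exact Or.inr ⟨t, ht', hc⟩
    · rw [if_neg (by simpa [List.isEmpty_iff] using hempty), ih,
        pvSymLoop_mem cs lineOf s.toList hempty 0 fl j]
      constructor
      · rintro ((h | h) | ⟨t, ht, hc⟩)
        · exact Or.inl h
        · exact Or.inr ⟨s, by simp, by rw [if_neg hempty]; exact h⟩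
        · exact Or.inr ⟨t, by simp [ht], hc⟩
      · rintro (h | ⟨t, ht, hc⟩)
        · exact Or.inl (Or.inl h)
        · rcases List.mem_cons.mp ht with rfl | ht'
          · rw [if_neg hempty] at hc
            exact Or.inl (Or.inr hc)
          · exact Or.inr ⟨t, ht', hc⟩

-- per line: the flagged test equals A's any-test
theorem pvContains_iff (content : List Char) (symbols : List String) (k : Nat)
    (hk : k < (pvSplitKeep content []).length) :
    PySem.Set.contains (symbols.foldl (fun fl s =>
        if s.toList.isEmpty then
          PySem.Set.update fl (PySem.List.pyRange 0 (((pvSplitKeep content []).length : Nat) : Int) 1)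
        else pvSymLoop content (pvLineOf (pvSplitKeep content [])) s.toList fl 0)
        PySem.Set.empty) (k : Int)
      = symbols.any (fun s => PySem.Chars.isIn s.toList ((pvSplitKeep content [])[k])) := by
  have hflat : (pvSplitKeep content []).flatten = content := by
    simpa using pvSplitKeep_flatten content []
  rw [Bool.eq_iff_iff, List.any_eq_true, pvContains_eq,
    pvFlagged_mem content (pvLineOf (pvSplitKeep content [])) (pvSplitKeep content []).length
      symbols PySem.Set.empty (k : Int)]
  constructor
  · rintro (h | ⟨s, hsym, hcond⟩)
    · exact absurd h (by simp [PySem.Set.empty])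
    · refine ⟨s, hsym, ?_⟩
      by_cases hempty : s.toList = []
      · rw [hempty]; exact PySem.Chars.isIn_nil _
      · rw [if_neg hempty, pvLineOf_eq] at hcond
        have hcond2 : pvOcc (pvSplitKeep content []).flatten (pvG (pvSplitKeep content []) 0)
            s.toList 0 (k : Int) := by rw [hflat]; exact hcond
        obtain ⟨k', hk', hj', hin⟩ := (pvOcc_iff (pvSplitKeep content []) s.toList hempty 0 (k : Int)).mp hcond2
        have hkk : k' = k := by omega
        subst hkk
        exact hin
  · rintro ⟨s, hsym, hin⟩
    refine Or.inr ⟨s, hsym, ?_⟩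
    by_cases hempty : s.toList = []
    · rw [if_pos hempty]
      exact ⟨by positivity, by exact_mod_cast hk⟩
    · have hocc := (pvOcc_iff (pvSplitKeep content []) s.toList hempty 0 (k : Int)).mpr
        ⟨k, hk, by simp, hin⟩
      rw [hflat] at hocc
      rw [if_neg hempty, pvLineOf_eq]
      exact hocc

theorem pvJoinNil_append (xs : List (List Char)) (y : List Char) :
    PySem.Chars.join [] (xs ++ [y]) = PySem.Chars.join [] xs ++ y := by
  simp [PySem.Chars.join, List.intercalate]
  induction xs with
  | nil => simp
  | cons x xs ih =>
    cases xs with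
    | nil => simp [List.intersperse]
    | cons z zs => simpa [List.intersperse] using ih

-- the two final folds agree on the joined accumulator and the flag
theorem pvFold_eq (symbols : List String) (fl : PySem.Set Int) (ls : List (List Char)) (s0 : Int)
    (hc : ∀ (k : Nat), k < ls.length →
      PySem.Set.contains fl (s0 + (k : Int)) = symbols.any (fun s => PySem.Chars.isIn s.toList (ls.getD k [])))
    (a b : List (List Char)) (m : Bool)
    (hab : PySem.Chars.join [] a = PySem.Chars.join [] b) :
    PySem.Chars.join []
      (ls.foldl (fun (st : List (List Char) × Bool) line =>
        let stripped := PySem.Chars.lstrip line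
        if stripped.isEmpty || PySem.Chars.startswith stripped ['/', '/'] || PySem.Chars.startswith stripped ['/', '*'] then
          (st.1 ++ [line], st.2)
        else if symbols.any (fun s => PySem.Chars.isIn s.toList line) then
          (st.1 ++ [pvCommentPrefix ++ line], true)
        else
          (st.1 ++ [line], st.2)) (a, m)).1 =
    PySem.Chars.join []
      ((PySem.List.enumerate ls s0).foldl (fun (st : List (List Char) × Bool) p =>
        let stripped := PySem.Chars.lstrip p.2
        if PySem.Set.contains fl p.1 && !stripped.isEmpty
            && !(PySem.Chars.startswith stripped ['/', '/'] || PySem.Chars.startswith stripped ['/', '*']) then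
          (st.1 ++ [pvCommentPrefix, p.2], true)
        else
          (st.1 ++ [p.2], st.2)) (b, m)).1
    ∧
    (ls.foldl (fun (st : List (List Char) × Bool) line =>
        let stripped := PySem.Chars.lstrip line
        if stripped.isEmpty || PySem.Chars.startswith stripped ['/', '/'] || PySem.Chars.startswith stripped ['/', '*'] then
          (st.1 ++ [line], st.2)
        else if symbols.any (fun s => PySem.Chars.isIn s.toList line) then
          (st.1 ++ [pvCommentPrefix ++ line], true)
        else
          (st.1 ++ [line], st.2)) (a, m)).2 =
    ((PySem.List.enumerate ls s0).foldl (fun (st : List (List Char) × Bool) p =>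
        let stripped := PySem.Chars.lstrip p.2
        if PySem.Set.contains fl p.1 && !stripped.isEmpty
            && !(PySem.Chars.startswith stripped ['/', '/'] || PySem.Chars.startswith stripped ['/', '*']) then
          (st.1 ++ [pvCommentPrefix, p.2], true)
        else
          (st.1 ++ [p.2], st.2)) (b, m)).2 := by
  induction ls generalizing s0 a b m with
  | nil => exact ⟨hab, rfl⟩
  | cons ln rest ih =>
    rw [PySem.List.enumerate_cons]
    simp only [List.foldl_cons]
    have hc0 : PySem.Set.contains fl s0 = symbols.any (fun s => PySem.Chars.isIn s.toList ln) := by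
      simpa using hc 0 (by simp)
    have hcS : ∀ (k : Nat), k < rest.length →
        PySem.Set.contains fl ((s0 + 1) + (k : Int))
          = symbols.any (fun s => PySem.Chars.isIn s.toList (rest.getD k [])) := by
      intro k hk
      have h := hc (k + 1) (by simp only [List.length_cons]; omega)
      rw [show s0 + ((k + 1 : Nat) : Int) = (s0 + 1) + (k : Int) by push_cast; ring] at h
      simpa using h
    by_cases hskip : ((PySem.Chars.lstrip ln).isEmpty
        || PySem.Chars.startswith (PySem.Chars.lstrip ln) ['/', '/']
        || PySem.Chars.startswith (PySem.Chars.lstrip ln) ['/', '*']) = true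
    · have hB : (PySem.Set.contains fl s0 && !(PySem.Chars.lstrip ln).isEmpty
          && !(PySem.Chars.startswith (PySem.Chars.lstrip ln) ['/', '/']
              || PySem.Chars.startswith (PySem.Chars.lstrip ln) ['/', '*'])) = false := by
        by_cases hE : (PySem.Chars.lstrip ln).isEmpty = true
        · rw [hE]; simp
        · by_cases hS1 : PySem.Chars.startswith (PySem.Chars.lstrip ln) ['/', '/'] = true
          · rw [hS1]; simp
          · by_cases hS2 : PySem.Chars.startswith (PySem.Chars.lstrip ln) ['/', '*'] = true
            · rw [hS2]; simp
            · refine absurd hskip ?_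
              rw [Bool.not_eq_true] at hE hS1 hS2
              rw [hE, hS1, hS2]; simp
      rw [if_pos hskip, if_neg (by rw [hB]; simp)]
      exact ih (s0 + 1) hcS _ _ m (by rw [pvJoinNil_append, pvJoinNil_append, hab])
    · have hE : (PySem.Chars.lstrip ln).isEmpty = false := by
        cases hx : (PySem.Chars.lstrip ln).isEmpty
        · rfl
        · exact absurd (by rw [hx]; simp) hskip
      have hS1 : PySem.Chars.startswith (PySem.Chars.lstrip ln) ['/', '/'] = false := by
        cases hx : PySem.Chars.startswith (PySem.Chars.lstrip ln) ['/', '/']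
        · rfl
        · exact absurd (by rw [hx]; simp) hskip
      have hS2 : PySem.Chars.startswith (PySem.Chars.lstrip ln) ['/', '*'] = false := by
        cases hx : PySem.Chars.startswith (PySem.Chars.lstrip ln) ['/', '*']
        · rfl
        · exact absurd (by rw [hx]; simp) hskip
      by_cases hany : (symbols.any fun s => PySem.Chars.isIn s.toList ln) = true
      · rw [if_neg (by simp [hE, hS1, hS2]), if_pos hany,
          if_pos (by rw [hc0, hany, hE, hS1, hS2]; rfl)]
        refine ih (s0 + 1) hcS _ _ true ?_
        rw [pvJoinNil_append, hab,
          show b ++ [pvCommentPrefix, ln] = (b ++ [pvCommentPrefix]) ++ [ln] by simp,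
          pvJoinNil_append, pvJoinNil_append, List.append_assoc]
      · have hany' : (symbols.any fun s => PySem.Chars.isIn s.toList ln) = false := by
          simpa using hany
        rw [if_neg (by simp [hE, hS1, hS2]), if_neg (by rw [hany']; simp),
          if_neg (by rw [hc0, hany']; simp)]
        exact ih (s0 + 1) hcS _ _ m (by rw [pvJoinNil_append, pvJoinNil_append, hab])

-- ===== VERDICT (by name: the statement is the Claim_ definition above) =====
theorem comment_out_symbol_occurrences_spec : Claim_equal_comment_out_symbol_occurrences := by
  intro content symbols _
  unfold Spec_comment_out_symbol_occurrences comment_out_symbol_occurrences comment_out_symbol_occurrences_alt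
  obtain ⟨h1, h2⟩ := pvFold_eq symbols
    (symbols.foldl (fun fl s =>
      if s.toList.isEmpty then
        PySem.Set.update fl (PySem.List.pyRange 0 (((pvSplitKeep content.toList []).length : Nat) : Int) 1)
      else pvSymLoop content.toList (pvLineOf (pvSplitKeep content.toList [])) s.toList fl 0)
      PySem.Set.empty)
    (pvSplitKeep content.toList []) 0
    (fun k hk => by
      have h := pvContains_iff content.toList symbols k hk
      rw [List.getD_eq_getElem _ _ hk]
      simpa using h)
    [] [] false rfl
  exact Prod.ext (congrArg String.ofList h1) h2
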